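-- pv_equiv track=rewrite | github.com/Williamcs1400/SegComputacional | Projeto-1/main.py | mendKey
-- ===== SOURCE A (Python) =====
-- def mendKey(key, size):
--     if(len(key) == size):
--         return key
--     else:
--         aux = 0
--         keyBuilder = ''
--         for i in range(size):
--             keyBuilder += key[aux]
--             aux += 1
--             if aux == len(key):
--                 aux = 0
--         return keyBuilder
-- ===== SOURCE B (Python) =====
-- def mendKey(key, size):
--     if len(key) == size:
--         return key
--     return (key * (size // len(key) + 1))[:size]
-- ===== Notes on version B (the rewrite author's own statement) =====
-- stated objective: simpler
-- what changed: Replaces the per-character loop with a wrap-around counter by one string multiplication (enough copies of the key to cover size) followed by a slice to size.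
-- outside the precondition, e.g. on mendKey('', -3): A returns '', B raises ZeroDivisionError
import Mathlib
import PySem

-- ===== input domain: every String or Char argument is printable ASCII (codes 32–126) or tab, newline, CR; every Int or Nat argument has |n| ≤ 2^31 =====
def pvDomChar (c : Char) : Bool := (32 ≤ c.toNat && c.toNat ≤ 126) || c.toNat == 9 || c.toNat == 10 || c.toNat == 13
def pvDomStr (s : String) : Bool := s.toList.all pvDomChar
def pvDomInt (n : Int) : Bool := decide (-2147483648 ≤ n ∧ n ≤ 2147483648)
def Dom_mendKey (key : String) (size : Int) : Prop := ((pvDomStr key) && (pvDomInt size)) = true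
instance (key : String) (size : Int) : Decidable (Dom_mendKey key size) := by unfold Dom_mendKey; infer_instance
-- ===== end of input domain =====

-- B replaces A's per-character loop with a wrap-around counter by one build-and-slice:
-- multiply the key enough times to cover size, then slice to size (objective: simpler).


-- ===== PORT A =====
-- the 'for i in range(size)' loop, state = (aux, keyBuilder); key[aux] via pyGet?
-- (none = IndexError, unreachable inside Pre_: the loop stops there, faithful where Python returns)
def mendKeyLoop (cs : List Char) (aux : Int) (acc : String) : Nat → String
  | 0 => acc
  | n + 1 =>
    match PySem.List.pyGet? cs aux with
    | none => acc
    | some c =>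
      mendKeyLoop cs (if aux + 1 = (cs.length : Int) then 0 else aux + 1) (acc.push c) n

def mendKey (key : String) (size : Int) : String :=
  if (key.toList.length : Int) = size then key
  else mendKeyLoop key.toList 0 "" size.toNat

-- ===== PORT B =====
def mendKey_alt (key : String) (size : Int) : String :=
  if (key.toList.length : Int) = size then key
  else
    let cs := key.toList
    String.ofList (PySem.List.slice
      (PySem.List.pyRepeat cs (PySem.Int.floordiv size (cs.length : Int) + 1))
      none (some size))

-- ===== PRECONDITION & SPEC =====
-- Pre_ excludes the empty key with nonzero size: for positive size A raises IndexError
-- (and B ZeroDivisionError); for negative size A's empty loop returns '' while B's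
-- division by len(key) raises ZeroDivisionError.
def Pre_mendKey (key : String) (size : Int) : Prop := key ≠ "" ∨ size = 0
instance (key : String) (size : Int) : Decidable (Pre_mendKey key size) := by
  unfold Pre_mendKey; infer_instance
def pvWitness_mendKey : String × Int := ("ab", 5)

def Spec_mendKey (key : String) (size : Int) (out : String) : Prop := out = mendKey_alt key size
instance (key : String) (size : Int) (out : String) : Decidable (Spec_mendKey key size out) := by
  unfold Spec_mendKey; infer_instance

-- ===== CLAIM (what is proved, stated in full; the proofs are below) =====
def Claim_equal_mendKey : Prop := ∀ (key : String) (size : Int),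
  Dom_mendKey key size → Pre_mendKey key size → Spec_mendKey key size (mendKey key size)

-- ===== LEMMAS AND PROOFS =====

-- A's loop, for a valid cyclic index, produces the cyclic characters.
theorem mendKeyLoop_eq (cs : List Char) (hcs : cs ≠ []) :
    ∀ (n : Nat) (aux : Nat) (_ : aux < cs.length) (acc : String),
      mendKeyLoop cs (aux : Int) acc n
        = acc ++ String.ofList ((List.range n).map (fun i => cs.getD ((aux + i) % cs.length) 'x')) := by
  intro n
  induction n with
  | zero =>
    intro aux hx acc
    refine String.toList_inj.mp ?_
    simp [mendKeyLoop]
  | succ n ih =>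
    intro aux hx acc
    have hget : PySem.List.pyGet? cs (aux : Int) = some (cs.getD aux 'x') := by
      rw [PySem.List.pyGet?_natCast]
      simp [List.getElem?_eq_getElem hx]
    rw [mendKeyLoop, hget]
    have hL : 0 < cs.length := List.length_pos_iff.mpr hcs
    have hcast : ((aux : Int) + 1) = (((aux + 1) : Nat) : Int) := by push_cast; ring
    dsimp only
    have hstep : (if (aux : Int) + 1 = (cs.length : Int) then 0 else (aux : Int) + 1)
        = (((aux + 1) % cs.length : Nat) : Int) := by
      by_cases h : aux + 1 = cs.length
      · simp [hcast, h]
      · have hlt : aux + 1 < cs.length := by omega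
        have : ¬ ((aux : Int) + 1 = (cs.length : Int)) := by omega
        simp [this, Nat.mod_eq_of_lt hlt]
    rw [hstep, ih ((aux + 1) % cs.length) (Nat.mod_lt _ hL) (acc.push (cs.getD aux 'x'))]
    have hpush : ∀ (l : List Char),
        (acc.push (cs.getD aux 'x')) ++ String.ofList l
          = acc ++ String.ofList (cs.getD aux 'x' :: l) := by
      intro l
      refine String.toList_inj.mp ?_
      simp
    rw [hpush, List.range_succ_eq_map, List.map_cons, List.map_map]
    congr 2
    congr 1
    · rw [Nat.add_zero, Nat.mod_eq_of_lt hx]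
    · apply List.map_congr_left
      intro a _
      simp only [Function.comp_apply]
      rw [Nat.mod_add_mod]
      have hidx : aux + 1 + a = aux + Nat.succ a := by omega
      rw [hidx]

-- flatten of m copies of cs is the first L*m cyclic characters.
theorem flatten_replicate_eq (cs : List Char) (hcs : cs ≠ []) (m : Nat) :
    (List.replicate m cs).flatten
      = (List.range (cs.length * m)).map (fun i => cs.getD (i % cs.length) 'x') := by
  have hL : 0 < cs.length := List.length_pos_iff.mpr hcs
  induction m with
  | zero => simp
  | succ m ih =>
    have hrep : List.replicate (m + 1) cs = List.replicate m cs ++ [cs] :=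
      List.replicate_succ' ..
    rw [hrep, List.flatten_append, ih]
    have hrange : List.range (cs.length * (m + 1))
        = List.range (cs.length * m) ++ (List.range cs.length).map (fun x => cs.length * m + x) := by
      rw [Nat.mul_succ, List.range_add]
    rw [hrange, List.map_append]
    congr 1
    simp only [List.flatten_cons, List.flatten_nil, List.append_nil, List.map_map]
    apply List.ext_getElem
    · simp
    · intro i h1 h2
      have hi : i < cs.length := by simpa using h1
      have hmod : (cs.length * m + i) % cs.length = i := by
        rw [Nat.mul_add_mod, Nat.mod_eq_of_lt hi]
      simp [Function.comp, hmod, List.getElem?_eq_getElem hi]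

-- size // L is negative for negative size (positive L).
theorem floordiv_neg_of_neg (a : Int) (L : Nat) (hL : 0 < L) (ha : a < 0) :
    PySem.Int.floordiv a (L : Int) < 0 := by
  rw [PySem.Int.floordiv_lt_iff_lt_mul (by exact_mod_cast hL)]
  simpa using ha

theorem floordiv_cover (n L : Nat) (hL : 0 < L) :
    n ≤ L * (PySem.Int.floordiv (n : Int) (L : Int) + 1).toNat := by
  have hLZ : (0 : Int) < (L : Int) := by exact_mod_cast hL
  have hnn : 0 ≤ PySem.Int.floordiv (n : Int) (L : Int) := by
    rw [PySem.Int.le_floordiv_iff_mul_le hLZ]; simp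
  have h1 : ¬ (PySem.Int.floordiv (n : Int) (L : Int) + 1 ≤ PySem.Int.floordiv (n : Int) (L : Int)) := by omega
  rw [PySem.Int.le_floordiv_iff_mul_le hLZ] at h1
  replace h1 := Int.lt_of_not_ge h1
  have h2 : (n : Int) < (L : Int) * (PySem.Int.floordiv (n : Int) (L : Int) + 1) := by
    calc (n : Int) < (PySem.Int.floordiv (n : Int) (L : Int) + 1) * (L : Int) := h1
      _ = (L : Int) * (PySem.Int.floordiv (n : Int) (L : Int) + 1) := by ring
  have htn : (((PySem.Int.floordiv (n : Int) (L : Int) + 1).toNat : Int))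
      = PySem.Int.floordiv (n : Int) (L : Int) + 1 := Int.toNat_of_nonneg (by omega)
  have h3 : (n : Int) < ((L * (PySem.Int.floordiv (n : Int) (L : Int) + 1).toNat : Nat) : Int) := by
    push_cast
    rw [htn]
    exact h2
  exact le_of_lt (by exact_mod_cast h3)

-- ===== VERDICT (by name: the statement is the Claim_ definition above) =====
theorem mendKey_spec : Claim_equal_mendKey := by
  intro key size _ hpre
  unfold Spec_mendKey mendKey mendKey_alt
  set cs := key.toList with hcs
  by_cases hguard : (cs.length : Int) = size
  · simp [hguard]
  · simp only [hguard, if_false]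
    by_cases hempty : cs = []
    · -- Pre_ forces size = 0, but then the guard would have fired; contradiction
      rcases hpre with hk | hz
      · exact absurd (String.toList_inj.mp (by rw [← hcs, hempty]; rfl)) hk
      · exact absurd (by simp [hempty, hz]) hguard
    · have hL : 0 < cs.length := List.length_pos_iff.mpr hempty
      rcases lt_trichotomy size 0 with hneg | hzero | hpos
      · -- both sides empty
        have h1 : size.toNat = 0 := by omega
        have h2 : (PySem.Int.floordiv size (cs.length : Int) + 1).toNat = 0 := by
          have := floordiv_neg_of_neg size cs.length hL hneg
          omega
        rw [h1]
        have hrep : PySem.List.pyRepeat cs (PySem.Int.floordiv size (cs.length : Int) + 1) = [] := by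
          unfold PySem.List.pyRepeat
          rw [h2]
          rfl
        rw [hrep]
        obtain ⟨k, hk, hsk⟩ : ∃ k : Nat, 0 < k ∧ size = -(k : Int) :=
          ⟨size.natAbs, by omega, by omega⟩
        rw [hsk, PySem.List.slice_to_neg_natCast _ _ hk, List.take_nil]
        rfl
      · have h1 : size.toNat = 0 := by omega
        have h2 : PySem.List.slice (PySem.List.pyRepeat cs (PySem.Int.floordiv size (cs.length : Int) + 1)) none (some size)
            = [] := by
          rw [PySem.List.slice_to _ (le_of_eq hzero.symm)]
          simp [hzero]
        rw [h1, h2]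
        rfl
      · -- positive size
        set n := size.toNat with hn
        have hsz : size = (n : Int) := by omega
        set m := (PySem.Int.floordiv size (cs.length : Int) + 1).toNat with hm
        have hcover : n ≤ cs.length * m := by
          rw [hm, hsz]; exact floordiv_cover n cs.length hL
        have hA := mendKeyLoop_eq cs hempty n 0 hL ""
        have hB : PySem.List.slice (PySem.List.pyRepeat cs (PySem.Int.floordiv size (cs.length : Int) + 1)) none (some size)
            = (List.range n).map (fun i => cs.getD (i % cs.length) 'x') := by
          rw [PySem.List.slice_to _ (le_of_lt hpos)]
          rw [PySem.List.pyRepeat, ← hm, flatten_replicate_eq cs hempty m]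
          rw [← List.map_take, List.take_range, ← hn, Nat.min_eq_left hcover]
        rw [hB]
        have hA' : mendKeyLoop cs 0 "" n
            = String.ofList ((List.range n).map (fun i => cs.getD (i % cs.length) 'x')) := by
          rw [show ((0 : Nat) : Int) = (0 : Int) from rfl] at hA
          rw [hA, String.empty_append]
          simp
        rw [hA']
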